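-- pv_equiv track=rewrite | github.com/peter-clark/code-helpers | chess960.py | isValid960Pos
-- ===== SOURCE A (Python) =====
-- def isValid960Pos(pos):
--     valid = True
--     bishops = True
--     rookyet = False
--     kingyet = False
--
--     for p in range(len(pos)):
--         piece=pos[p]
--
--         if piece=='B1':
--             check=p%2
--             if check%2==0:
--                 return False
--
--         if piece=='B2':
--             check=p%2
--             if check%2==1:
--                 return False
--
--         if piece=='K':
--             kingyet=True
--             if rookyet==False:
--                 return False
--
--         if piece=='R1' or piece=='R2':
--             if rookyet==False:
--                 if kingyet==True:
--                     return False # seen king but not rook yet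
--                 rookyet=True
--             else:
--                 if kingyet==False: # seen both rooks and no king
--                     return False
--     return True
-- ===== SOURCE B (Python) =====
-- def isValid960Pos(pos):
--     for i, piece in enumerate(pos):
--         if piece == 'B1' and i % 2 == 0:
--             return False
--         if piece == 'B2' and i % 2 == 1:
--             return False
--     rooks = [i for i, p in enumerate(pos) if p == 'R1' or p == 'R2']
--     kings = [i for i, p in enumerate(pos) if p == 'K']
--     if kings and (not rooks or kings[0] < rooks[0]):
--         return False
--     if len(rooks) >= 2 and (not kings or rooks[1] < kings[0]):
--         return False
--     return True
-- ===== Notes on version B (the rewrite author's own statement) =====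
-- stated objective: simpler
-- what changed: Replaces A's single stateful scan with rookyet/kingyet flags by a bishop-parity pass plus one-pass-built rook and king index lists whose first elements are compared directly (rook before king, king before second rook).
import Mathlib
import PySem

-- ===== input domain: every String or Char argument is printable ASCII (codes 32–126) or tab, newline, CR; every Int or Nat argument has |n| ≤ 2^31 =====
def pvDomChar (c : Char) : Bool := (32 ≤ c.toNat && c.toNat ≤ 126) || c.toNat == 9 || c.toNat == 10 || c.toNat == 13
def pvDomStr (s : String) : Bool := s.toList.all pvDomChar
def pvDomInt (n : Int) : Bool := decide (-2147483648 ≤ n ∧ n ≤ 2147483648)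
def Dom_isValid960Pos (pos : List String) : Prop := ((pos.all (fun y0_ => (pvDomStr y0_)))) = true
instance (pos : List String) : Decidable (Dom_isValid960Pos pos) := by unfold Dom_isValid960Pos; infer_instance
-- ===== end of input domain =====

-- B replaces A's stateful two-flag scan by a bishop-parity pass plus precomputed
-- rook/king index lists compared by position (objective: simpler).


-- ===== PORT A =====
-- literal transliteration of A's indexed for-loop with early returns,
-- carried by the rookyet/kingyet flags
def isValid960PosLoop (pos : List String) (p : Nat) (rookyet kingyet : Bool) : Bool :=
  if h : p < pos.length then
    let piece := pos[p]
    if piece = "B1" ∧ (p % 2) % 2 = 0 then false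
    else if piece = "B2" ∧ (p % 2) % 2 = 1 then false
    else if piece = "K" then
      (if rookyet = false then false
       else isValid960PosLoop pos (p + 1) rookyet true)
    else if piece = "R1" ∨ piece = "R2" then
      (if rookyet = false then
        (if kingyet = true then false
         else isValid960PosLoop pos (p + 1) true kingyet)
       else if kingyet = false then false
       else isValid960PosLoop pos (p + 1) rookyet kingyet)
    else isValid960PosLoop pos (p + 1) rookyet kingyet
  else true
  termination_by pos.length - p

def isValid960Pos (pos : List String) : Bool :=
  isValid960PosLoop pos 0 false false

-- ===== PORT B =====
-- B's first loop: every 'B1' on an odd index, every 'B2' on an even index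
def isValid960PosBishops : List (Int × String) → Bool
  | [] => true
  | (i, piece) :: rest =>
    if piece = "B1" ∧ i % 2 = 0 then false
    else if piece = "B2" ∧ i % 2 = 1 then false
    else isValid960PosBishops rest

def isValid960Pos_alt (pos : List String) : Bool :=
  let e := PySem.List.enumerate pos 0
  if isValid960PosBishops e = false then false
  else
    let rooks := (e.filter (fun x => x.2 == "R1" || x.2 == "R2")).map Prod.fst
    let kings := (e.filter (fun x => x.2 == "K")).map Prod.fst
    if kings ≠ [] ∧ (rooks = [] ∨ kings.head! < rooks.head!) then false
    else if 2 ≤ rooks.length ∧ (kings = [] ∨ rooks[1]! < kings.head!) then false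
    else true

-- ===== PRECONDITION & SPEC =====
def Spec_isValid960Pos (pos : List String) (out : Bool) : Prop := out = isValid960Pos_alt pos
instance (pos : List String) (out : Bool) : Decidable (Spec_isValid960Pos pos out) := by unfold Spec_isValid960Pos; infer_instance

-- ===== CLAIM (what is proved, stated in full; the proofs are below) =====
def Claim_equal_isValid960Pos : Prop := ∀ (pos : List String), Dom_isValid960Pos pos → Spec_isValid960Pos pos (isValid960Pos pos)

-- ===== LEMMAS AND PROOFS =====

-- A's loop, re-expressed over the indexed list (proof device)
def pvAList : List (Int × String) → Bool → Bool → Bool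
  | [], _, _ => true
  | (i, piece) :: rest, rookyet, kingyet =>
    if piece = "B1" ∧ i % 2 = 0 then false
    else if piece = "B2" ∧ i % 2 = 1 then false
    else if piece = "K" then
      (if rookyet = false then false else pvAList rest rookyet true)
    else if piece = "R1" ∨ piece = "R2" then
      (if rookyet = false then
        (if kingyet = true then false else pvAList rest true kingyet)
       else if kingyet = false then false
       else pvAList rest rookyet kingyet)
    else pvAList rest rookyet kingyet

def pvRooks (l : List (Int × String)) : List Int :=
  (l.filter (fun x => x.2 == "R1" || x.2 == "R2")).map Prod.fst

def pvKings (l : List (Int × String)) : List Int :=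
  (l.filter (fun x => x.2 == "K")).map Prod.fst

def pvBCond (l : List (Int × String)) : Bool :=
  if pvKings l ≠ [] ∧ (pvRooks l = [] ∨ (pvKings l).head! < (pvRooks l).head!) then false
  else if 2 ≤ (pvRooks l).length ∧ (pvKings l = [] ∨ (pvRooks l)[1]! < (pvKings l).head!) then false
  else true

-- 'rookyet ∧ ¬kingyet' continuation condition: no rook remains, or a king precedes the first rook
def pvCond2 (l : List (Int × String)) : Bool :=
  if pvRooks l = [] then true
  else if pvKings l ≠ [] ∧ (pvKings l).head! < (pvRooks l).head! then true
  else false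

lemma pv_head_filter_map (f : Int × String → Bool) :
    ∀ (l : List (Int × String)) (r : Int) (rs : List Int),
      (l.filter f).map Prod.fst = r :: rs → ∃ e, e ∈ l ∧ e.1 = r ∧ f e = true := by
  intro l
  induction l with
  | nil => simp
  | cons a t ih =>
    intro r rs h
    by_cases hf : f a = true
    · simp [hf] at h
      exact ⟨a, by simp, h.1, hf⟩
    · simp [hf] at h
      obtain ⟨e, he, h1, h2⟩ := ih r rs h
      exact ⟨e, by simp [he], h1, h2⟩

lemma pv_mem_enum_lb {xs : List String} {s : Int} {e : Int × String}
    (h : e ∈ PySem.List.enumerate xs s) : s ≤ e.1 := by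
  rw [PySem.List.mem_enumerate_iff] at h
  obtain ⟨k, hk, rfl⟩ := h
  simp

lemma pv_enum_fst_inj {xs : List String} {s : Int} {a b : Int × String}
    (ha : a ∈ PySem.List.enumerate xs s) (hb : b ∈ PySem.List.enumerate xs s)
    (h : a.1 = b.1) : a = b := by
  rw [PySem.List.mem_enumerate_iff] at ha hb
  obtain ⟨k, hk, rfl⟩ := ha
  obtain ⟨k', hk', rfl⟩ := hb
  have hkk : k = k' := by simp at h; omega
  subst hkk
  rfl

lemma pv_main : ∀ (xs : List String) (s : Int),
    (pvAList (PySem.List.enumerate xs s) false false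
       = (isValid960PosBishops (PySem.List.enumerate xs s) && pvBCond (PySem.List.enumerate xs s)))
  ∧ (pvAList (PySem.List.enumerate xs s) true false
       = (isValid960PosBishops (PySem.List.enumerate xs s) && pvCond2 (PySem.List.enumerate xs s)))
  ∧ (pvAList (PySem.List.enumerate xs s) true true
       = isValid960PosBishops (PySem.List.enumerate xs s)) := by
  intro xs
  induction xs with
  | nil =>
    intro s
    simp [PySem.List.enumerate_nil, pvAList, isValid960PosBishops, pvBCond, pvCond2, pvRooks,
      pvKings]
  | cons x xs ih =>
    intro s
    obtain ⟨ih1, ih2, ih3⟩ := ih (s + 1)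
    have hRlb : ∀ r rs, pvRooks (PySem.List.enumerate xs (s + 1)) = r :: rs → s < r := by
      intro r rs h
      obtain ⟨e, he, h1, _⟩ := pv_head_filter_map _ _ _ _ h
      have := pv_mem_enum_lb he
      omega
    have hKlb : ∀ k ks, pvKings (PySem.List.enumerate xs (s + 1)) = k :: ks → s < k := by
      intro k ks h
      obtain ⟨e, he, h1, _⟩ := pv_head_filter_map _ _ _ _ h
      have := pv_mem_enum_lb he
      omega
    have hNe : ∀ k ks r rs, pvKings (PySem.List.enumerate xs (s + 1)) = k :: ks →
        pvRooks (PySem.List.enumerate xs (s + 1)) = r :: rs → k ≠ r := by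
      intro k ks r rs hk hr heq
      obtain ⟨ek, hek, hek1, hek2⟩ := pv_head_filter_map _ _ _ _ hk
      obtain ⟨er, her, her1, her2⟩ := pv_head_filter_map _ _ _ _ hr
      have := pv_enum_fst_inj hek her (by rw [hek1, her1, heq])
      subst this
      simp at hek2 her2
      rcases her2 with h2 | h2 <;> rw [hek2] at h2 <;> exact absurd h2 (by decide)
    rw [PySem.List.enumerate_cons]
    by_cases hx1 : x = "B1"
    · subst hx1
      have hK : pvKings (((s, "B1") : Int × String) :: PySem.List.enumerate xs (s + 1))
          = pvKings (PySem.List.enumerate xs (s + 1)) := by simp [pvKings]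
      have hR : pvRooks (((s, "B1") : Int × String) :: PySem.List.enumerate xs (s + 1))
          = pvRooks (PySem.List.enumerate xs (s + 1)) := by simp [pvRooks]
      by_cases hs : s % 2 = 0
      · refine ⟨?_, ?_, ?_⟩ <;> simp [pvAList, isValid960PosBishops, hs]
      · refine ⟨?_, ?_, ?_⟩ <;>
          simp [pvAList, isValid960PosBishops, hs, pvBCond, pvCond2, hK, hR] <;>
          simp [pvBCond, pvCond2] at ih1 ih2 ih3 <;> assumption
    · by_cases hx2 : x = "B2"
      · subst hx2
        have hK : pvKings (((s, "B2") : Int × String) :: PySem.List.enumerate xs (s + 1))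
            = pvKings (PySem.List.enumerate xs (s + 1)) := by simp [pvKings]
        have hR : pvRooks (((s, "B2") : Int × String) :: PySem.List.enumerate xs (s + 1))
            = pvRooks (PySem.List.enumerate xs (s + 1)) := by simp [pvRooks]
        by_cases hs : s % 2 = 1
        · refine ⟨?_, ?_, ?_⟩ <;> simp [pvAList, isValid960PosBishops, hs]
        · refine ⟨?_, ?_, ?_⟩ <;>
            simp [pvAList, isValid960PosBishops, hs, pvBCond, pvCond2, hK, hR] <;>
            simp [pvBCond, pvCond2] at ih1 ih2 ih3 <;> assumption
      · by_cases hxK : x = "K"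
        · subst hxK
          have hK : pvKings (((s, "K") : Int × String) :: PySem.List.enumerate xs (s + 1))
              = s :: pvKings (PySem.List.enumerate xs (s + 1)) := by simp [pvKings]
          have hR : pvRooks (((s, "K") : Int × String) :: PySem.List.enumerate xs (s + 1))
              = pvRooks (PySem.List.enumerate xs (s + 1)) := by simp [pvRooks]
          have hB : isValid960PosBishops (((s, "K") : Int × String)
              :: PySem.List.enumerate xs (s + 1))
              = isValid960PosBishops (PySem.List.enumerate xs (s + 1)) := by
            simp [isValid960PosBishops]
          have hBC : pvBCond (((s, "K") : Int × String) :: PySem.List.enumerate xs (s + 1))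
              = false := by
            rw [pvBCond, hK, hR]
            rcases hr : pvRooks (PySem.List.enumerate xs (s + 1)) with _ | ⟨r, rs⟩
            · simp
            · have := hRlb r rs hr
              simp [List.head!]
              omega
          have hC2 : pvCond2 (((s, "K") : Int × String) :: PySem.List.enumerate xs (s + 1))
              = true := by
            rw [pvCond2, hK, hR]
            rcases hr : pvRooks (PySem.List.enumerate xs (s + 1)) with _ | ⟨r, rs⟩
            · simp
            · have := hRlb r rs hr
              simp [List.head!]
              omega
          refine ⟨?_, ?_, ?_⟩
          · simp [pvAList, hBC]
          · simp [pvAList, hB, hC2, ih3]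
          · simp [pvAList, hB, ih3]
        · by_cases hxR : x = "R1" ∨ x = "R2"
          · have hK : pvKings (((s, x) : Int × String) :: PySem.List.enumerate xs (s + 1))
                = pvKings (PySem.List.enumerate xs (s + 1)) := by
              rcases hxR with h | h <;> subst h <;> simp [pvKings]
            have hR : pvRooks (((s, x) : Int × String) :: PySem.List.enumerate xs (s + 1))
                = s :: pvRooks (PySem.List.enumerate xs (s + 1)) := by
              rcases hxR with h | h <;> subst h <;> simp [pvRooks]
            have hB : isValid960PosBishops (((s, x) : Int × String)
                :: PySem.List.enumerate xs (s + 1))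
                = isValid960PosBishops (PySem.List.enumerate xs (s + 1)) := by
              rcases hxR with h | h <;> subst h <;> simp [isValid960PosBishops]
            have hAL : ∀ rk kg, pvAList (((s, x) : Int × String)
                :: PySem.List.enumerate xs (s + 1)) rk kg
                = (if rk = false then
                    (if kg = true then false
                     else pvAList (PySem.List.enumerate xs (s + 1)) true kg)
                   else if kg = false then false
                   else pvAList (PySem.List.enumerate xs (s + 1)) rk kg) := by
              intro rk kg
              rcases hxR with h | h <;> subst h <;> simp [pvAList]
            have hBC : pvBCond (((s, x) : Int × String) :: PySem.List.enumerate xs (s + 1))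
                = pvCond2 (PySem.List.enumerate xs (s + 1)) := by
              rw [pvBCond, hK, hR, pvCond2]
              rcases hr : pvRooks (PySem.List.enumerate xs (s + 1)) with _ | ⟨r, rs⟩
              · rcases hk : pvKings (PySem.List.enumerate xs (s + 1)) with _ | ⟨k, ks⟩
                · simp
                · have := hKlb k ks hk
                  simp [List.head!]
                  omega
              · rcases hk : pvKings (PySem.List.enumerate xs (s + 1)) with _ | ⟨k, ks⟩
                · simp
                · have hlbk := hKlb k ks hk
                  have hne := hNe k ks r rs hk hr
                  simp [List.head!]
                  have h1 : ¬ k < s := by omega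
                  by_cases hkr : k < r
                  · simp [hkr, h1, show ¬ r < k by omega]
                  · simp [hkr, h1, show r < k by omega]
            have hC2 : pvCond2 (((s, x) : Int × String) :: PySem.List.enumerate xs (s + 1))
                = false := by
              rw [pvCond2, hK, hR]
              rcases hk : pvKings (PySem.List.enumerate xs (s + 1)) with _ | ⟨k, ks⟩
              · simp
              · have := hKlb k ks hk
                simp [List.head!]
                omega
            refine ⟨?_, ?_, ?_⟩
            · rw [hAL, hB, hBC]
              simpa using ih2
            · rw [hAL, hB, hC2]
              simp
            · rw [hAL, hB]
              simpa using ih3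
          · rw [not_or] at hxR
            have hK : pvKings (((s, x) : Int × String) :: PySem.List.enumerate xs (s + 1))
                = pvKings (PySem.List.enumerate xs (s + 1)) := by
              simp [pvKings, hxK]
            have hR : pvRooks (((s, x) : Int × String) :: PySem.List.enumerate xs (s + 1))
                = pvRooks (PySem.List.enumerate xs (s + 1)) := by
              simp [pvRooks, hxR.1, hxR.2]
            have hBC : pvBCond (((s, x) : Int × String) :: PySem.List.enumerate xs (s + 1))
                = pvBCond (PySem.List.enumerate xs (s + 1)) := by
              rw [pvBCond, pvBCond, hK, hR]
            have hC2 : pvCond2 (((s, x) : Int × String) :: PySem.List.enumerate xs (s + 1))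
                = pvCond2 (PySem.List.enumerate xs (s + 1)) := by
              rw [pvCond2, pvCond2, hK, hR]
            refine ⟨?_, ?_, ?_⟩ <;>
              simp [pvAList, isValid960PosBishops, hx1, hx2, hxK, hxR.1, hxR.2, hBC, hC2,
                ih1, ih2, ih3]

lemma pv_bridge (pos : List String) : ∀ (n p : Nat), pos.length - p = n → ∀ rk kg,
    isValid960PosLoop pos p rk kg
      = pvAList (PySem.List.enumerate (pos.drop p) (p : Int)) rk kg := by
  intro n
  induction n with
  | zero =>
    intro p hp rk kg
    have hge : pos.length ≤ p := by omega
    rw [isValid960PosLoop]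
    simp [Nat.not_lt.mpr hge, List.drop_of_length_le hge, PySem.List.enumerate_nil, pvAList]
  | succ n ih =>
    intro p hp rk kg
    have hlt : p < pos.length := by omega
    have ih' := fun rk kg => ih (p + 1) (by omega) rk kg
    have hcast : ((p : Int) + 1) = ((p + 1 : Nat) : Int) := by push_cast; ring
    rw [isValid960PosLoop, List.drop_eq_getElem_cons hlt, PySem.List.enumerate_cons, pvAList]
    simp only [dif_pos hlt,
      show ((p : Int) % 2 = 0) ↔ ((p % 2) % 2 = 0) from by omega,
      show ((p : Int) % 2 = 1) ↔ ((p % 2) % 2 = 1) from by omega, hcast]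
    split_ifs <;> first | rfl | exact ih' _ _

-- ===== VERDICT (by name: the statement is the Claim_ definition above) =====
theorem isValid960Pos_spec : Claim_equal_isValid960Pos := by
  intro pos _
  unfold Spec_isValid960Pos isValid960Pos isValid960Pos_alt
  rw [pv_bridge pos (pos.length - 0) 0 rfl]
  simp only [List.drop_zero, Int.natCast_zero]
  rw [(pv_main pos 0).1]
  cases hb : isValid960PosBishops (PySem.List.enumerate pos 0) with
  | false => simp
  | true => simp [pvBCond, pvKings, pvRooks]
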